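-- pv_equiv track=rewrite | github.com/Eventual-Inc/Daft | daft/execution/shuffles/flight_shuffle/flight_shuffle.py | optimize_reduce_partition_assignment
-- ===== SOURCE A (Python) =====
-- def optimize_reduce_partition_assignment(actor_node_ids, num_partitions):
--     # Assign 2x number of reduce tasks as there are actors, this seems to work alright in practice
--     num_reduce_tasks = len(actor_node_ids) * 2
--
--     # Map partitions to reduce tasks in round robin fashion
--     partition_to_reduce_task = [
--         partition_idx % num_reduce_tasks for partition_idx in range(num_partitions)
--     ]
--
--     # Create the reverse mapping
--     reduce_task_to_partitions = [[] for _ in range(num_reduce_tasks)]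
--     for partition_idx, reduce_task_idx in enumerate(partition_to_reduce_task):
--         reduce_task_to_partitions[reduce_task_idx].append(partition_idx)
--
--     return reduce_task_to_partitions, partition_to_reduce_task
-- ===== SOURCE B (Python) =====
-- def optimize_reduce_partition_assignment(actor_node_ids, num_partitions):
--     num_reduce_tasks = len(actor_node_ids) * 2
--     # Gather: each reduce task t owns the arithmetic progression t, t+k, t+2k, ...
--     reduce_task_to_partitions = [
--         list(range(t, num_partitions, num_reduce_tasks)) for t in range(num_reduce_tasks)
--     ]
--     partition_to_reduce_task = [p % num_reduce_tasks for p in range(num_partitions)]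
--     return reduce_task_to_partitions, partition_to_reduce_task
-- ===== Notes on version B (the rewrite author's own statement) =====
-- stated objective: alternative
-- what changed: The reverse mapping is built by gathering (each reduce task strides over its arithmetic progression of partitions) instead of scattering (enumerating partitions and appending into indexed buckets).
import Mathlib
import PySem

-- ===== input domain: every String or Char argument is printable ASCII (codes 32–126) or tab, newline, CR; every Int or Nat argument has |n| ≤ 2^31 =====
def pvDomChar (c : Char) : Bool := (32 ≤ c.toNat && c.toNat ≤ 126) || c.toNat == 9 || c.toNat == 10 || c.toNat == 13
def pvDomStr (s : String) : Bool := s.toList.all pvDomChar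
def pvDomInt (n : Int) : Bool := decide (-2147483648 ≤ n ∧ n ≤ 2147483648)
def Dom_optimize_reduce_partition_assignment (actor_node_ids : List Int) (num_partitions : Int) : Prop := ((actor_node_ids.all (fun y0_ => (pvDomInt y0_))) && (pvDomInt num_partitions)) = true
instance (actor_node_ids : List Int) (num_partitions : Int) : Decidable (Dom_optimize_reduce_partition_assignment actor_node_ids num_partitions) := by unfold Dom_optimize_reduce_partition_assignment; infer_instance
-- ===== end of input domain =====

-- B builds the reverse mapping by gathering (each reduce task strides over its arithmetic
-- progression of partitions) instead of A's scatter (enumerate partitions, append into buckets).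


-- ===== PORT A =====
def optimize_reduce_partition_assignment (actor_node_ids : List Int) (num_partitions : Int) : List (List Int) × List Int :=
  let num_reduce_tasks : Int := (actor_node_ids.length : Int) * 2
  let partition_to_reduce_task : List Int :=
    (PySem.List.pyRange 0 num_partitions 1).map
      (fun partition_idx => PySem.Int.mod partition_idx num_reduce_tasks)
  let reduce_task_to_partitions : List (List Int) :=
    (PySem.List.enumerate partition_to_reduce_task 0).foldl
      (fun acc pr =>
        -- reduce_task_to_partitions[reduce_task_idx].append(partition_idx)
        PySem.List.pySetD acc pr.2 (PySem.List.pyGetD acc pr.2 [] ++ [pr.1]))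
      ((PySem.List.pyRange 0 num_reduce_tasks 1).map (fun _ => []))
  (reduce_task_to_partitions, partition_to_reduce_task)

-- ===== PORT B =====
def optimize_reduce_partition_assignment_alt (actor_node_ids : List Int) (num_partitions : Int) : List (List Int) × List Int :=
  let num_reduce_tasks : Int := (actor_node_ids.length : Int) * 2
  let reduce_task_to_partitions : List (List Int) :=
    (PySem.List.pyRange 0 num_reduce_tasks 1).map
      (fun t => PySem.List.pyRange t num_partitions num_reduce_tasks)
  let partition_to_reduce_task : List Int :=
    (PySem.List.pyRange 0 num_partitions 1).map
      (fun p => PySem.Int.mod p num_reduce_tasks)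
  (reduce_task_to_partitions, partition_to_reduce_task)

-- ===== PRECONDITION & SPEC =====
-- Pre_ excludes only the inputs where Python A raises ZeroDivisionError
-- (empty actor_node_ids with num_partitions > 0); B raises there too.
def Pre_optimize_reduce_partition_assignment (actor_node_ids : List Int) (num_partitions : Int) : Prop :=
  actor_node_ids ≠ [] ∨ num_partitions ≤ 0
instance (actor_node_ids : List Int) (num_partitions : Int) : Decidable (Pre_optimize_reduce_partition_assignment actor_node_ids num_partitions) := by unfold Pre_optimize_reduce_partition_assignment; infer_instance
def pvWitness_optimize_reduce_partition_assignment : List Int × Int := ([1, 2], 7)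

def Spec_optimize_reduce_partition_assignment (actor_node_ids : List Int) (num_partitions : Int) (out : List (List Int) × List Int) : Prop := out = optimize_reduce_partition_assignment_alt actor_node_ids num_partitions
instance (actor_node_ids : List Int) (num_partitions : Int) (out : List (List Int) × List Int) : Decidable (Spec_optimize_reduce_partition_assignment actor_node_ids num_partitions out) := by unfold Spec_optimize_reduce_partition_assignment; infer_instance

-- ===== CLAIM (what is proved, stated in full; the proofs are below) =====
def Claim_equal_optimize_reduce_partition_assignment : Prop := ∀ (actor_node_ids : List Int) (num_partitions : Int), Dom_optimize_reduce_partition_assignment actor_node_ids num_partitions → Pre_optimize_reduce_partition_assignment actor_node_ids num_partitions → Spec_optimize_reduce_partition_assignment actor_node_ids num_partitions (optimize_reduce_partition_assignment actor_node_ids num_partitions)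

-- ===== LEMMAS AND PROOFS =====

-- A positive-step range starting at a nonnegative point with nonpositive stop is empty.
lemma pyRange_pos_eq_nil {t b k : Int} (hk : 0 < k) (hb : b ≤ t) :
    PySem.List.pyRange t b k = [] := by
  rw [PySem.List.pyRange_of_pos _ _ hk, if_neg (by omega)]
  simp

-- B's stride range is the filter of the full range by residue class.
lemma stride_eq_filter {k t : Int} (hk : 0 < k) (ht0 : 0 ≤ t) (htk : t < k) (b : Int) :
    PySem.List.pyRange t b k
      = (PySem.List.pyRange 0 b 1).filter (fun p => PySem.Int.mod p k == t) := by
  have hpw1 : (PySem.List.pyRange t b k).Pairwise (· < ·) := by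
    rw [PySem.List.pyRange_of_pos _ _ hk]
    refine List.Pairwise.map _ ?_ (List.pairwise_lt_range)
    intro i j hij
    have : k * (i : Int) < k * (j : Int) :=
      mul_lt_mul_of_pos_left (by exact_mod_cast hij) hk
    omega
  have hpw2 : ((PySem.List.pyRange 0 b 1).filter (fun p => PySem.Int.mod p k == t)).Pairwise (· < ·) :=
    (PySem.List.pairwise_lt_pyRange_one 0 b).filter _
  have hmem : ∀ x : Int, x ∈ PySem.List.pyRange t b k ↔
      x ∈ (PySem.List.pyRange 0 b 1).filter (fun p => PySem.Int.mod p k == t) := by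
    intro x
    rw [PySem.List.mem_pyRange_iff_of_pos hk, List.mem_filter,
        PySem.List.mem_pyRange_one, beq_iff_eq, PySem.Int.mod_eq_emod_of_pos hk]
    constructor
    · rintro ⟨h1, h2, c, hc⟩
      refine ⟨⟨by omega, h2⟩, ?_⟩
      have : x = t + k * c := by omega
      subst this
      rw [Int.add_mul_emod_self_left]
      exact Int.emod_eq_of_lt ht0 htk
    · rintro ⟨⟨h1, h2⟩, h3⟩
      have hd : k ∣ x - t := by
        have ht' : t % k = t := Int.emod_eq_of_lt ht0 htk
        have h4 : x % k = t % k := by omega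
        exact Int.dvd_of_emod_eq_zero (Int.emod_eq_emod_iff_emod_sub_eq_zero.mp h4)
      refine ⟨?_, h2, hd⟩
      -- t ≤ x: x ≥ 0 and x ≡ t (mod k), t < k
      have hx : x % k = t := h3
      have := Int.emod_nonneg x (by omega : k ≠ 0)
      by_cases hxk : x < k
      · have : x % k = x := Int.emod_eq_of_lt h1 hxk
        omega
      · omega
  have hperm : (PySem.List.pyRange t b k).Perm
      ((PySem.List.pyRange 0 b 1).filter (fun p => PySem.Int.mod p k == t)) :=
    (List.perm_ext_iff_of_nodup hpw1.nodup hpw2.nodup).mpr hmem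
  exact hperm.eq_of_pairwise (le := (· < ·)) (fun a b _ _ h1 h2 => absurd h2 (by omega)) hpw1 hpw2

-- enumerate of a mapped list whose i-th element is a + i pairs each element with itself.
lemma enumerate_map_self {β : Type} (f : Int → β) :
    ∀ (l : List Int) (a : Int), (∀ (i : Nat) (h : i < l.length), l[i] = a + (i : Int)) →
      PySem.List.enumerate (l.map f) a = l.map (fun p => (p, f p)) := by
  intro l
  induction l with
  | nil => intro a _; simp
  | cons x xs ih =>
    intro a h
    have hx : x = a := by simpa using h 0 (by simp)
    rw [List.map_cons, PySem.List.enumerate_cons, List.map_cons, hx,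
        ih (a + 1) (fun i hi => by
          have := h (i + 1) (by simpa using Nat.succ_lt_succ hi)
          simpa [add_assoc, add_comm, add_left_comm] using this)]

-- The scatter loop of A, run on range(0, n), produces exactly the residue-class filters.
lemma scatter_eq_filters {k : Int} (hk : 0 < k) :
    ∀ (n : Nat),
      (((List.range n).map (fun j : Nat => (j : Int))).map (fun p => (p, PySem.Int.mod p k))).foldl
          (fun acc pr => PySem.List.pySetD acc pr.2 (PySem.List.pyGetD acc pr.2 [] ++ [pr.1]))
          ((PySem.List.pyRange 0 k 1).map (fun _ => []))
        = (PySem.List.pyRange 0 k 1).map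
            (fun t => (((List.range n).map (fun j : Nat => (j : Int)))).filter (fun p => PySem.Int.mod p k == t)) := by
  have hlenR : (PySem.List.pyRange 0 k 1).length = k.toNat := by
    rw [PySem.List.length_pyRange_one]; congr 1; omega
  have hRj : ∀ (j : Nat) (h : j < (PySem.List.pyRange 0 k 1).length),
      (PySem.List.pyRange 0 k 1)[j] = (j : Int) := by
    intro j h
    rw [PySem.List.getElem_pyRange_one 0 k j h]; omega
  intro n
  induction n with
  | zero => simp
  | succ m ih =>
    rw [List.range_succ]
    simp only [List.map_append, List.map_cons, List.map_nil, List.foldl_append, List.foldl_cons,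
      List.foldl_nil, List.filter_append, List.filter_cons, List.filter_nil]
    rw [ih]
    have hr0 : 0 ≤ PySem.Int.mod ((m : Nat) : Int) k := PySem.Int.mod_nonneg _ hk
    have hrk : PySem.Int.mod ((m : Nat) : Int) k < k := PySem.Int.mod_lt _ hk
    have hget : PySem.List.pyGetD
        ((PySem.List.pyRange 0 k 1).map
          (fun t => (((List.range m).map (fun j : Nat => (j : Int)))).filter (fun p => PySem.Int.mod p k == t)))
        (PySem.Int.mod ((m : Nat) : Int) k) []
        = (((List.range m).map (fun j : Nat => (j : Int)))).filter
            (fun p => PySem.Int.mod p k == PySem.Int.mod ((m : Nat) : Int) k) := by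
      rw [PySem.List.pyGetD_eq_getElem _ [] hr0 (by rw [List.length_map, hlenR]; omega)]
      rw [List.getElem_map, hRj _ (by rw [hlenR]; omega)]
      have h1 : (((PySem.Int.mod ((m : Nat) : Int) k).toNat : Nat) : Int)
          = PySem.Int.mod ((m : Nat) : Int) k := by omega
      rw [h1]
    rw [PySem.List.pySetD_of_nonneg _ _ hr0, hget]
    apply List.ext_getElem?
    intro j
    by_cases hj : j < k.toNat
    · rw [List.getElem?_eq_getElem (by simp [hlenR]; omega),
          List.getElem?_eq_getElem (by simp [hlenR]; omega)]
      congr 1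
      rw [List.getElem_set, List.getElem_map, List.getElem_map, hRj _ (by omega)]
      by_cases hjr : (PySem.Int.mod ((m : Nat) : Int) k).toNat = j
      · rw [if_pos hjr]
        have h1 : ((j : Nat) : Int) = PySem.Int.mod ((m : Nat) : Int) k := by omega
        rw [h1, if_pos (beq_self_eq_true _)]
      · rw [if_neg hjr]
        have h1 : (PySem.Int.mod ((m : Nat) : Int) k == ((j : Nat) : Int)) = false := by
          rw [beq_eq_false_iff_ne]; omega
        rw [h1, if_neg (by simp), List.append_nil]
    · rw [List.getElem?_eq_none (by simp [hlenR]; omega),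
          List.getElem?_eq_none (by simp [hlenR]; omega)]

-- ===== VERDICT (by name: the statement is the Claim_ definition above) =====
theorem optimize_reduce_partition_assignment_spec : Claim_equal_optimize_reduce_partition_assignment := by
  intro ids n _ hpre
  unfold Spec_optimize_reduce_partition_assignment
  unfold optimize_reduce_partition_assignment optimize_reduce_partition_assignment_alt
  by_cases hids : ids = []
  · subst hids
    have hn : n ≤ 0 := by
      rcases hpre with h | h
      · exact absurd rfl h
      · exact h
    simp [PySem.List.pyRange_one_eq_nil hn]
  · have hk : 0 < (ids.length : Int) * 2 := by
      have : ids.length ≠ 0 := fun h => hids (List.eq_nil_of_length_eq_zero h)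
      omega
    set k : Int := (ids.length : Int) * 2 with hkdef
    refine Prod.ext ?_ rfl
    by_cases hn : 0 ≤ n
    · -- positive case: use the scatter/gather lemmas with n = ↑n.toNat
      have hcast : ((List.range n.toNat).map (fun j : Nat => (j : Int)))
          = PySem.List.pyRange 0 n 1 := by
        rw [PySem.List.pyRange_one]
        norm_num
      have henum : PySem.List.enumerate ((PySem.List.pyRange 0 n 1).map
            (fun p => PySem.Int.mod p k)) 0
          = (PySem.List.pyRange 0 n 1).map (fun p => (p, PySem.Int.mod p k)) :=
        enumerate_map_self (fun p => PySem.Int.mod p k) _ 0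
          (fun i hi => PySem.List.getElem_pyRange_one 0 n i hi)
      show (PySem.List.enumerate ((PySem.List.pyRange 0 n 1).map (fun p => PySem.Int.mod p k)) 0).foldl _ _ = _
      rw [henum, ← hcast]
      rw [scatter_eq_filters hk n.toNat]
      refine List.map_congr_left (fun t ht => ?_)
      rw [PySem.List.mem_pyRange_one] at ht
      rw [stride_eq_filter hk ht.1 ht.2 n, ← hcast]
    · -- n < 0: every range over partitions is empty
      have hnil : PySem.List.pyRange 0 n 1 = [] := PySem.List.pyRange_one_eq_nil (by omega)
      show (PySem.List.enumerate ((PySem.List.pyRange 0 n 1).map (fun p => PySem.Int.mod p k)) 0).foldl _ _ = _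
      rw [hnil]
      simp only [List.map_nil, PySem.List.enumerate, List.foldl_nil]
      refine List.map_congr_left (fun t ht => ?_)
      rw [PySem.List.mem_pyRange_one] at ht
      exact (pyRange_pos_eq_nil hk (by omega)).symm
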